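-- pv_equiv track=rewrite | github.com/yasssshhhhhh/DataStructuresAndAlgo | arrays/powerjump.py | powerOfJump
-- ===== SOURCE A (Python) =====
-- def powerOfJump(s):
--
-- 	# Initialize the count with 1
-- 	count = 1
-- 	max_so_far = 0
--
-- 	# Find the character at last index
-- 	ch = s[-1]
--
-- 	# Start traversing the string
-- 	for i in range(0, len(s)):
--
-- 		# Check if the current char is
-- 		# equal to the last character
-- 		if s[i] == ch:
--
-- 			# max_so_far stores maximum value of
-- 			# the power of the jump from starting
-- 			# to ith position
-- 			if count > max_so_far:
-- 				max_so_far = count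
--
-- 			# Reset the count to 1
-- 			count = 1
--
-- 		# Else, increment the number
-- 		# of jumps/count
-- 		else:
-- 			count += 1
--
-- 	# Return the maximum number of jumps
-- 	return max_so_far
-- ===== SOURCE B (Python) =====
-- def powerOfJump(s):
--     ch = s[-1]
--     idx = [-1] + [i for i, c in enumerate(s) if c == ch]
--     return max(b - a for a, b in zip(idx, idx[1:]))
-- ===== Notes on version B (the rewrite author's own statement) =====
-- stated objective: alternative
-- what changed: B replaces A's running-counter state machine (count/max_so_far updated per character) with a stateless decomposition: collect the occurrence indices of the last character once, prepend a -1 sentinel, and take the maximum consecutive difference.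
import Mathlib
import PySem

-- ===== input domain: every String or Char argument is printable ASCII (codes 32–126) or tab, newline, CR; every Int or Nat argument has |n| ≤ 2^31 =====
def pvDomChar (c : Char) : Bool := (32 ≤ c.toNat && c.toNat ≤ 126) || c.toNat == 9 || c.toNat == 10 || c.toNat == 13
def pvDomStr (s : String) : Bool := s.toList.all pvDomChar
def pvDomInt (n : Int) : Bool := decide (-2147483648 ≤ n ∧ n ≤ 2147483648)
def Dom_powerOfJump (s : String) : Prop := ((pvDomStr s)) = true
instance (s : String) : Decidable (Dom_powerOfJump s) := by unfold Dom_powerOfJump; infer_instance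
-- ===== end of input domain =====

-- B replaces A's running-counter loop by building the last-char occurrence-index list
-- (with a -1 sentinel) and taking the max consecutive difference: an alternative decomposition, same cost.


-- ===== PORT A =====
-- literal port of A: ch = s[-1]; loop i in range(len(s)) updating (count, max_so_far).
-- s[i] is ported with pyGetD (exact here: every index of range(len(s)) is in range).
def powerOfJump (s : String) : Int :=
  match PySem.Str.pyGet? s (-1) with
  | none => 0   -- unreachable under Pre_: Python raises IndexError on the empty string
  | some ch =>
    ((PySem.List.pyRange 0 (PySem.Str.len s) 1).foldl
      (fun (st : Int × Int) i =>
        if PySem.List.pyGetD s.toList i ' ' = ch then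
          (1, if st.1 > st.2 then st.1 else st.2)
        else (st.1 + 1, st.2)) (1, 0)).2

-- ===== PORT B =====
-- literal port of B: ch = s[-1]; idx = [-1] + occurrence indices; max of consecutive differences.
-- Python's max over the (always nonempty under Pre_) generator is ported as max? … |>.getD 0.
def powerOfJump_alt (s : String) : Int :=
  match PySem.Str.pyGet? s (-1) with
  | none => 0   -- unreachable under Pre_: Python raises IndexError on the empty string
  | some ch =>
    let idx : List Int :=
      (-1) :: (PySem.List.enumerate s.toList 0).filterMap
        (fun p => if p.2 = ch then some p.1 else none)
    (PySem.List.max? ((idx.zip (idx.drop 1)).map (fun p => p.2 - p.1)) (fun x => x)).getD 0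

-- ===== PRECONDITION & SPEC =====
-- Pre_ excludes only the empty string, on which both A and B raise IndexError at s[-1].
def Pre_powerOfJump (s : String) : Prop := s ≠ ""
instance (s : String) : Decidable (Pre_powerOfJump s) := by unfold Pre_powerOfJump; infer_instance
def pvWitness_powerOfJump : String := "abcb"

def Spec_powerOfJump (s : String) (out : Int) : Prop := out = powerOfJump_alt s
instance (s : String) (out : Int) : Decidable (Spec_powerOfJump s out) := by unfold Spec_powerOfJump; infer_instance

-- ===== CLAIM (what is proved, stated in full; the proofs are below) =====
def Claim_equal_powerOfJump : Prop := ∀ (s : String), Dom_powerOfJump s → Pre_powerOfJump s → Spec_powerOfJump s (powerOfJump s)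

-- ===== LEMMAS AND PROOFS =====

-- the list of "jump counts" A's loop emits: one entry per occurrence of ch, the running count there
def pvEmits (ch : Char) (count : Int) : List Char → List Int
  | [] => []
  | c :: t => if c = ch then count :: pvEmits ch 1 t else pvEmits ch (count + 1) t

-- occurrence indices of ch in cs, starting at index k
def pvOcc (ch : Char) (k : Int) : List Char → List Int
  | [] => []
  | c :: t => if c = ch then k :: pvOcc ch (k + 1) t else pvOcc ch (k + 1) t

-- consecutive differences against a previous value p
def pvDiffs (p : Int) : List Int → List Int
  | [] => []
  | x :: t => (x - p) :: pvDiffs x t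

theorem pvA_fold (ch : Char) (cs : List Char) :
    ∀ (count mx : Int),
      (cs.foldl (fun (st : Int × Int) c =>
          if c = ch then (1, if st.1 > st.2 then st.1 else st.2)
          else (st.1 + 1, st.2)) (count, mx)).2
        = (pvEmits ch count cs).foldl (fun m x => if x > m then x else m) mx := by
  induction cs with
  | nil => intro count mx; simp [pvEmits]
  | cons c t ih =>
    intro count mx
    by_cases h : c = ch <;> simp [pvEmits, h, ih]

theorem pvOcc_filterMap (ch : Char) (cs : List Char) :
    ∀ (k : Int),
      (PySem.List.enumerate cs k).filterMap (fun p => if p.2 = ch then some p.1 else none)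
        = pvOcc ch k cs := by
  induction cs with
  | nil => intro k; simp [PySem.List.enumerate_nil, pvOcc]
  | cons c t ih =>
    intro k
    by_cases h : c = ch <;> simp [PySem.List.enumerate_cons, pvOcc, h, ih]

theorem pvDiffs_zip (l : List Int) : ∀ (p : Int),
    (((p :: l).zip ((p :: l).drop 1)).map (fun q => q.2 - q.1)) = pvDiffs p l := by
  induction l with
  | nil => intro p; simp [pvDiffs]
  | cons x t ih =>
    intro p
    have := ih x
    simpa [pvDiffs] using this

theorem pvDiffs_occ (ch : Char) (cs : List Char) :
    ∀ (k p : Int), pvDiffs p (pvOcc ch k cs) = pvEmits ch (k - p) cs := by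
  induction cs with
  | nil => intro k p; simp [pvOcc, pvEmits, pvDiffs]
  | cons c t ih =>
    intro k p
    by_cases h : c = ch
    · have h1 : (k : Int) + 1 - k = 1 := by ring
      simp [pvOcc, pvEmits, h, pvDiffs, ih, h1]
    · have h1 : (k : Int) + 1 - p = k - p + 1 := by ring
      simp [pvOcc, pvEmits, h, ih, h1]

theorem pvEmits_ne_nil (ch : Char) (cs : List Char) (hmem : ch ∈ cs) :
    ∀ count, pvEmits ch count cs ≠ [] := by
  induction cs with
  | nil => cases hmem
  | cons c t ih =>
    intro count
    by_cases h : c = ch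
    · simp [pvEmits, h]
    · have hmem' : ch ∈ t := by
        rcases List.mem_cons.mp hmem with h' | h'
        · exact absurd h'.symm h
        · exact h'
      simp [pvEmits, h, ih hmem']

theorem pvEmits_pos (ch : Char) (cs : List Char) :
    ∀ (count : Int), 1 ≤ count → ∀ x ∈ pvEmits ch count cs, 1 ≤ x := by
  induction cs with
  | nil => intro count _ x hx; simp [pvEmits] at hx
  | cons c t ih =>
    intro count hc x hx
    by_cases h : c = ch
    · simp [pvEmits, h] at hx
      rcases hx with rfl | hx
      · exact hc
      · exact ih 1 le_rfl x hx
    · simp [pvEmits, h] at hx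
      exact ih (count + 1) (by omega) x hx

theorem pvMax_fold (e : List Int) (hne : e ≠ []) (hpos : ∀ x ∈ e, 1 ≤ x) :
    e.foldl (fun m x => if x > m then x else m) 0
      = (PySem.List.max? e (fun x => x)).getD 0 := by
  rcases e with _ | ⟨x, t⟩
  · exact absurd rfl hne
  · have hstep : (fun (m x : Int) => if x > m then x else m) = (fun m x => max m x) := by
      funext m x
      by_cases h : x > m <;> simp [h, max_def] <;> omega
    have hinit : (if x > (0 : Int) then x else 0) = x := by
      have := hpos x (by simp); omega
    rw [PySem.List.max?_id_cons]
    simp only [List.foldl, hstep, Option.getD_some, hinit]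

-- ===== VERDICT (by name: the statement is the Claim_ definition above) =====
theorem powerOfJump_spec : Claim_equal_powerOfJump := by
  intro s _ hpre
  have hne : s.toList ≠ [] := fun h => hpre (String.toList_eq_nil_iff.mp h)
  have hlast : s.toList.getLast? = some (s.toList.getLast hne) :=
    List.getLast?_eq_some_getLast hne
  have hget : PySem.Str.pyGet? s (-1) = some (s.toList.getLast hne) := by
    simp [PySem.Str.pyGet?, PySem.List.pyGet?_neg_one, hlast]
  set ch := s.toList.getLast hne with hch
  have hmem : ch ∈ s.toList := List.getLast_mem hne
  show powerOfJump s = powerOfJump_alt s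
  rw [powerOfJump, powerOfJump_alt, hget]
  simp only
  -- A side: index loop → list foldl → pvEmits
  rw [PySem.Str.len_eq]
  rw [PySem.List.foldl_pyRange_zero_pyGetD' s.toList ' '
      (fun (st : Int × Int) c =>
        if c = ch then (1, if st.1 > st.2 then st.1 else st.2)
        else (st.1 + 1, st.2)) ((1 : Int), (0 : Int))]
  rw [pvA_fold ch s.toList 1 0]
  -- B side: enumerate/filterMap → pvOcc, zip → pvDiffs, pvDiffs → pvEmits
  rw [pvOcc_filterMap ch s.toList 0, pvDiffs_zip (pvOcc ch 0 s.toList) (-1)]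
  have h01 : (0 : Int) - (-1) = 1 := by ring
  rw [pvDiffs_occ ch s.toList 0 (-1), h01]
  exact pvMax_fold _ (pvEmits_ne_nil ch s.toList hmem 1) (pvEmits_pos ch s.toList 1 le_rfl)
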